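-- pv_equiv track=rewrite | github.com/pypi-data/pypi-mirror-319 | packages/DARTassembler/DARTassembler-1.0.4-py3-none-any.whl/DARTassembler/src/ligand_extraction/utilities_Molecule.py | get_standardized_stoichiometry_from_atoms_list
-- ===== SOURCE A (Python) =====
-- import collections
--
-- def get_standardized_stoichiometry_from_atoms_list(atoms: list) -> str:
--     c = collections.Counter(atoms)
--     elements = sorted(el for el in c.keys())
--     if "C" in elements:
--         if 'H' in elements:
--             elements = ["C", 'H'] + [el for el in elements if el not in ["C", 'H']]
--         else:
--             elements = ["C"] + [el for el in elements if el != "C"]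
--     else:
--         if 'H' in elements:
--             elements = ["H"] + [el for el in elements if el != "H"]
--
--     # formula = [f"{el}{(c[el]) if c[el] != 1 else ''}" for el in elements] # drop the 1 if an element occurs only once
--     formula = [f"{el}{(c[el])}" for el in elements]
--     return "".join(formula)
-- ===== SOURCE B (Python) =====
-- import collections
--
-- def get_standardized_stoichiometry_from_atoms_list(atoms: list) -> str:
--     c = collections.Counter(atoms)
--     hill = lambda el: '0' if el == 'C' else '1' if el == 'H' else '2' + el
--     return "".join(f"{el}{c[el]}" for el in sorted(c.keys(), key=hill))
-- ===== Notes on version B (the rewrite author's own statement) =====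
-- stated objective: simpler
-- what changed: Replaces the alphabetical sort followed by branch-based C/H reordering and filtering comprehensions with a single sort of the distinct elements under one Hill-priority key ('0' for C, '1' for H, '2'+element otherwise).
import Mathlib
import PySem

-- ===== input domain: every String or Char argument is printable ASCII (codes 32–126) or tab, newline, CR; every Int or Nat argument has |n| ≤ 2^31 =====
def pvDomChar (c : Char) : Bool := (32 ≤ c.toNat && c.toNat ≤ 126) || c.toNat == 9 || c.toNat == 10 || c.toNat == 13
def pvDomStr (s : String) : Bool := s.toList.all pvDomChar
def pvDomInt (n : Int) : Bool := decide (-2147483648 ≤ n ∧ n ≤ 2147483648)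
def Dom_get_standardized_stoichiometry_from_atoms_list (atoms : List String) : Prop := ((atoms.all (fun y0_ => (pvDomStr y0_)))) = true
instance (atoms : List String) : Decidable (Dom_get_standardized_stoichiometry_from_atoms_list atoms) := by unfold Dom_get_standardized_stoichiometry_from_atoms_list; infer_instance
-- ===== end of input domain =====

-- B replaces A's alphabetical sort + branchy C/H reordering by one sort under a Hill-priority key (simpler decomposition; same cost).

-- ===== PORT A =====
def get_standardized_stoichiometry_from_atoms_list (atoms : List String) : String :=
  let c := PySem.Dict.counter atoms
  let elements := PySem.List.sorted c.keys (fun el => el)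
  let elements :=
    if "C" ∈ elements then
      if "H" ∈ elements then
        ["C", "H"] ++ elements.filter (fun el => decide (el ∉ (["C", "H"] : List String)))
      else
        ["C"] ++ elements.filter (fun el => decide (el ≠ "C"))
    else
      if "H" ∈ elements then
        ["H"] ++ elements.filter (fun el => decide (el ≠ "H"))
      else elements
  PySem.Str.join "" (elements.map (fun el => el ++ PySem.Int.toStr (c.getD el 0)))

-- ===== PORT B =====
-- hill el = '0' if el == 'C' else '1' if el == 'H' else '2' + el
def pvHillKey (el : String) : String :=
  if el = "C" then "0" else if el = "H" then "1" else "2" ++ el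

def get_standardized_stoichiometry_from_atoms_list_alt (atoms : List String) : String :=
  let c := PySem.Dict.counter atoms
  let order := PySem.List.sorted c.keys pvHillKey
  PySem.Str.join "" (order.map (fun el => el ++ PySem.Int.toStr (c.getD el 0)))

-- ===== PRECONDITION & SPEC =====
def Spec_get_standardized_stoichiometry_from_atoms_list (atoms : List String) (out : String) : Prop := out = get_standardized_stoichiometry_from_atoms_list_alt atoms
instance (atoms : List String) (out : String) : Decidable (Spec_get_standardized_stoichiometry_from_atoms_list atoms out) := by unfold Spec_get_standardized_stoichiometry_from_atoms_list; infer_instance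

-- ===== CLAIM (what is proved, stated in full; the proofs are below) =====
def Claim_equal_get_standardized_stoichiometry_from_atoms_list : Prop := ∀ (atoms : List String), Dom_get_standardized_stoichiometry_from_atoms_list atoms → Spec_get_standardized_stoichiometry_from_atoms_list atoms (get_standardized_stoichiometry_from_atoms_list atoms)

-- ===== LEMMAS AND PROOFS =====

-- pvHillKey is strictly monotone on elements that are neither "C" nor "H"
theorem pvHillKey_mono {a b : String} (haC : a ≠ "C") (haH : a ≠ "H")
    (hbC : b ≠ "C") (hbH : b ≠ "H") (hab : a < b) : pvHillKey a < pvHillKey b := by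
  simp only [pvHillKey, if_neg haC, if_neg haH, if_neg hbC, if_neg hbH]
  rw [String.lt_iff_toList_lt] at hab ⊢
  simp only [String.toList_append]
  exact List.cons_lt_cons_iff.mpr (Or.inr ⟨rfl, hab⟩)

theorem pvHillKey_C_eq : pvHillKey "C" = "0" := by simp [pvHillKey]
theorem pvHillKey_H_eq : pvHillKey "H" = "1" := by simp [pvHillKey]

theorem pvHillKey_C_lt {x : String} (hx : x ≠ "C") : pvHillKey "C" < pvHillKey x := by
  by_cases hH : x = "H"
  · subst hH; rw [pvHillKey_C_eq, pvHillKey_H_eq, String.lt_iff_toList_lt]; decide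
  · have h1 : pvHillKey x = "2" ++ x := by simp [pvHillKey, hx, hH]
    rw [pvHillKey_C_eq, h1, String.lt_iff_toList_lt]
    simp only [String.toList_append]
    exact List.cons_lt_cons_iff.mpr (Or.inl (by decide))

theorem pvHillKey_H_lt {x : String} (hxC : x ≠ "C") (hxH : x ≠ "H") :
    pvHillKey "H" < pvHillKey x := by
  have h1 : pvHillKey x = "2" ++ x := by simp [pvHillKey, hxC, hxH]
  rw [pvHillKey_H_eq, h1, String.lt_iff_toList_lt]
  simp only [String.toList_append]
  exact List.cons_lt_cons_iff.mpr (Or.inl (by decide))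

-- The central fact: sorting the distinct keys by the Hill key equals A's reordering
-- of the alphabetically sorted keys.
theorem hill_reorder (atoms : List String) :
    PySem.List.sorted (PySem.Dict.counter atoms).keys pvHillKey =
      (let S := PySem.List.sorted (PySem.Dict.counter atoms).keys (fun el => el)
       if "C" ∈ S then
         if "H" ∈ S then
           ["C", "H"] ++ S.filter (fun el => decide (el ∉ (["C", "H"] : List String)))
         else
           ["C"] ++ S.filter (fun el => decide (el ≠ "C"))
       else
         if "H" ∈ S then
           ["H"] ++ S.filter (fun el => decide (el ≠ "H"))
         else S) := by
  set K := (PySem.Dict.counter atoms).keys with hK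
  set S := PySem.List.sorted K (fun el => el) with hS
  have hperm : S.Perm K := PySem.List.sorted_perm K _ false
  have hpw : S.Pairwise (· < ·) := by
    rw [hS, hK, PySem.Dict.keys_counter]
    exact PySem.List.sorted_ofList_pairwise_lt atoms
  have hnd : S.Nodup := hpw.imp (fun h => ne_of_lt h)
  simp only []
  split_ifs with hC hH hH
  · -- C ∈ S and H ∈ S
    apply PySem.List.sorted_eq_of_perm_of_pairwise_lt
    · -- permutation
      refine List.Perm.trans ?_ hperm
      have h1 : S.Perm ("C" :: S.erase "C") := List.perm_cons_erase hC
      have hHe : "H" ∈ S.erase "C" :=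
        (List.mem_erase_of_ne (by decide : ("H" : String) ≠ "C")).mpr hH
      have h2 : (S.erase "C").Perm ("H" :: (S.erase "C").erase "H") :=
        List.perm_cons_erase hHe
      have hnd' : (S.erase "C").Nodup := hnd.erase _
      have he : (S.erase "C").erase "H" =
          S.filter (fun el => decide (el ∉ (["C", "H"] : List String))) := by
        rw [hnd.erase_eq_filter "C", (hnd.filter _).erase_eq_filter "H",
          List.filter_filter]
        apply List.filter_congr
        intro x _
        simp only [List.mem_cons, List.mem_singleton, not_or, bne_iff_ne,
          Bool.and_comm]
        by_cases h1 : x = "C" <;> by_cases h2 : x = "H" <;> simp [h1, h2]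
        
      rw [he] at h2
      exact ((h1.trans (List.Perm.cons _ h2))).symm
    · -- pairwise strictly increasing Hill keys
      have hfilt : ∀ x ∈ S.filter (fun el => decide (el ∉ (["C", "H"] : List String))),
          x ≠ "C" ∧ x ≠ "H" := by
        intro x hx
        have := List.of_mem_filter hx
        simp only [decide_eq_true_eq, List.mem_cons, List.mem_singleton,
          List.not_mem_nil, not_or] at this
        exact ⟨this.1, this.2.1⟩
      refine List.Pairwise.cons ?_ (List.Pairwise.cons ?_ ?_)
      · intro x hx
        rcases List.mem_cons.mp hx with h | h
        · subst h
          rw [pvHillKey_C_eq, pvHillKey_H_eq, String.lt_iff_toList_lt]; decide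
        · exact pvHillKey_C_lt (hfilt x h).1
      · intro x hx
        exact pvHillKey_H_lt (hfilt x hx).1 (hfilt x hx).2
      · have := hpw.filter (fun el => decide (el ∉ (["C", "H"] : List String)))
        exact this.imp_of_mem (fun {a b} ha hb hlt =>
          pvHillKey_mono (hfilt a ha).1 (hfilt a ha).2 (hfilt b hb).1 (hfilt b hb).2 hlt)
  · -- C ∈ S, H ∉ S
    apply PySem.List.sorted_eq_of_perm_of_pairwise_lt
    · refine List.Perm.trans ?_ hperm
      have h1 : S.Perm ("C" :: S.erase "C") := List.perm_cons_erase hC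
      have he : S.erase "C" = S.filter (fun el => decide (el ≠ "C")) := by
        rw [hnd.erase_eq_filter "C"]
        apply List.filter_congr
        intro x _; by_cases h : x = "C" <;> simp [h]
      rw [he] at h1
      exact h1.symm
    · have hfilt : ∀ x ∈ S.filter (fun el => decide (el ≠ "C")), x ≠ "C" ∧ x ≠ "H" := by
        intro x hx
        refine ⟨by simpa using List.of_mem_filter hx, ?_⟩
        intro h; exact hH (h ▸ List.mem_of_mem_filter hx)
      refine List.Pairwise.cons ?_ ?_
      · intro x hx; exact pvHillKey_C_lt (hfilt x hx).1
      · have := hpw.filter (fun el => decide (el ≠ "C"))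
        exact this.imp_of_mem (fun {a b} ha hb hlt =>
          pvHillKey_mono (hfilt a ha).1 (hfilt a ha).2 (hfilt b hb).1 (hfilt b hb).2 hlt)
  · -- C ∉ S, H ∈ S
    apply PySem.List.sorted_eq_of_perm_of_pairwise_lt
    · refine List.Perm.trans ?_ hperm
      have h1 : S.Perm ("H" :: S.erase "H") := List.perm_cons_erase hH
      have he : S.erase "H" = S.filter (fun el => decide (el ≠ "H")) := by
        rw [hnd.erase_eq_filter "H"]
        apply List.filter_congr
        intro x _; by_cases h : x = "H" <;> simp [h]
      rw [he] at h1
      exact h1.symm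
    · have hfilt : ∀ x ∈ S.filter (fun el => decide (el ≠ "H")), x ≠ "C" ∧ x ≠ "H" := by
        intro x hx
        refine ⟨?_, by simpa using List.of_mem_filter hx⟩
        intro h; exact hC (h ▸ List.mem_of_mem_filter hx)
      refine List.Pairwise.cons ?_ ?_
      · intro x hx; exact pvHillKey_H_lt (hfilt x hx).1 (hfilt x hx).2
      · have := hpw.filter (fun el => decide (el ≠ "H"))
        exact this.imp_of_mem (fun {a b} ha hb hlt =>
          pvHillKey_mono (hfilt a ha).1 (hfilt a ha).2 (hfilt b hb).1 (hfilt b hb).2 hlt)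
  · -- neither C nor H present
    apply PySem.List.sorted_eq_of_perm_of_pairwise_lt
    · exact hperm
    · refine hpw.imp_of_mem (fun {a b} ha hb hlt => ?_)
      exact pvHillKey_mono (fun h => hC (h ▸ ha)) (fun h => hH (h ▸ ha))
        (fun h => hC (h ▸ hb)) (fun h => hH (h ▸ hb)) hlt

-- ===== VERDICT (by name: the statement is the Claim_ definition above) =====
theorem get_standardized_stoichiometry_from_atoms_list_spec : Claim_equal_get_standardized_stoichiometry_from_atoms_list := by
  intro atoms _
  show get_standardized_stoichiometry_from_atoms_list atoms =
    get_standardized_stoichiometry_from_atoms_list_alt atoms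
  unfold get_standardized_stoichiometry_from_atoms_list
    get_standardized_stoichiometry_from_atoms_list_alt
  have h := hill_reorder atoms
  simp only [] at h ⊢
  rw [h]
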